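-- pv_equiv track=rewrite | github.com/So-Myoung/python_algorithm_2025 | eunjin_kim/brute_force/모의고사_Lv1.py | solution
-- ===== SOURCE A (Python) =====
-- def solution(answers):
--     math1 = [1, 2, 3, 4, 5]
--     math2 = [2, 1, 2, 3, 2, 4, 2, 5]
--     math3 = [3, 3, 1, 1, 2, 2, 4, 4, 5, 5]
--
--     score = [0, 0, 0]
--     for i in range(len(answers)):
--         if math1[i%5] == answers[i]:
--             score[0] += 1
--         if math2[i%8] == answers[i]:
--             score[1] += 1
--         if math3[i%10] == answers[i]:
--             score[2] += 1
--
--     result = []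
--     max_score = max(score)
--     for i in range(3):
--         if score[i] == max_score:
--             result.append(i+1)
--
--     return result
-- ===== SOURCE B (Python) =====
-- def _score(pattern, answers):
--     # one independent pass: walk answers with a cycling cursor over the pattern
--     s = 0
--     cur = ()
--     for a in answers:
--         if not cur:
--             cur = tuple(pattern)
--         if cur[0] == a:
--             s += 1
--         cur = cur[1:]
--     return s
--
--
-- def solution(answers):
--     s1 = _score([1, 2, 3, 4, 5], answers)
--     s2 = _score([2, 1, 2, 3, 2, 4, 2, 5], answers)
--     s3 = _score([3, 3, 1, 1, 2, 2, 4, 4, 5, 5], answers)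
--     m = max(s1, s2, s3)
--     return [i + 1 for i, s in enumerate((s1, s2, s3)) if s == m]
-- ===== Notes on version B (the rewrite author's own statement) =====
-- stated objective: alternative
-- what changed: Replaces A's single indexed loop doing three modular lookups per element with three independent passes, each walking the answers once with a cycling cursor over its own pattern (no index arithmetic).
import Mathlib
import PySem

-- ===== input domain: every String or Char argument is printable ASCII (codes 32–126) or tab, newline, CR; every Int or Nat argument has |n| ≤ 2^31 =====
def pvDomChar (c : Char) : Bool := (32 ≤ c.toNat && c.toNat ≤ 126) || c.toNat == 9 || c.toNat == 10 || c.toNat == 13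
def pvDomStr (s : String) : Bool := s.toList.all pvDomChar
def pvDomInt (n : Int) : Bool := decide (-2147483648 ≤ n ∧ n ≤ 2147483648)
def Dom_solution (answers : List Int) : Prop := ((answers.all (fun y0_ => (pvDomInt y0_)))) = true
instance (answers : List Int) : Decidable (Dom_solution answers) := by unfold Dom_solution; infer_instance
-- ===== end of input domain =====

-- One honest line: B computes the three pattern scores with three independent cycling-cursor
-- passes over the answers instead of A's single indexed loop with modular lookups (alternative decomposition).

-- ===== PORT A =====
def solution (answers : List Int) : List Int :=
  let math1 : List Int := [1, 2, 3, 4, 5]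
  let math2 : List Int := [2, 1, 2, 3, 2, 4, 2, 5]
  let math3 : List Int := [3, 3, 1, 1, 2, 2, 4, 4, 5, 5]
  -- 'for i in range(len(answers)) … answers[i]' as a fold over (value, index) pairs; indices are in range
  let score := answers.zipIdx.foldl
    (fun (s : Int × Int × Int) (p : Int × Nat) =>
      ((if math1[p.2 % 5]! = p.1 then s.1 + 1 else s.1),
       (if math2[p.2 % 8]! = p.1 then s.2.1 + 1 else s.2.1),
       (if math3[p.2 % 10]! = p.1 then s.2.2 + 1 else s.2.2))) (0, 0, 0)
  let maxScore := max score.1 (max score.2.1 score.2.2)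
  (if score.1 = maxScore then [1] else []) ++
    (if score.2.1 = maxScore then [2] else []) ++
    (if score.2.2 = maxScore then [3] else [])

-- ===== PORT B =====
-- B's per-pattern pass: walk the answers once, cycling a cursor over the pattern
def scoreGo (pat : List Int) : List Int → List Int → Int → Int
  | [], _, s => s
  | a :: as, cur, s =>
    let c := if cur = [] then pat else cur
    scoreGo pat as c.tail (if c.head? = some a then s + 1 else s)

def solution_alt (answers : List Int) : List Int :=
  let s1 := scoreGo [1, 2, 3, 4, 5] answers [] 0
  let s2 := scoreGo [2, 1, 2, 3, 2, 4, 2, 5] answers [] 0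
  let s3 := scoreGo [3, 3, 1, 1, 2, 2, 4, 4, 5, 5] answers [] 0
  let m := max s1 (max s2 s3)
  (if s1 = m then [1] else []) ++ (if s2 = m then [2] else []) ++ (if s3 = m then [3] else [])

-- ===== PRECONDITION & SPEC =====
def Spec_solution (answers : List Int) (out : List Int) : Prop := out = solution_alt answers
instance (answers : List Int) (out : List Int) : Decidable (Spec_solution answers out) := by unfold Spec_solution; infer_instance

-- ===== CLAIM =====
def Claim_equal_solution : Prop := ∀ (answers : List Int), Dom_solution answers → Spec_solution answers (solution answers)

-- ===== LEMMAS AND PROOFS =====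

-- the combined fold of A splits into three independent folds
lemma fold_split (l : List (Int × Nat)) (s : Int × Int × Int) :
    l.foldl
      (fun (s : Int × Int × Int) (p : Int × Nat) =>
        ((if ([1, 2, 3, 4, 5] : List Int)[p.2 % 5]! = p.1 then s.1 + 1 else s.1),
         (if ([2, 1, 2, 3, 2, 4, 2, 5] : List Int)[p.2 % 8]! = p.1 then s.2.1 + 1 else s.2.1),
         (if ([3, 3, 1, 1, 2, 2, 4, 4, 5, 5] : List Int)[p.2 % 10]! = p.1 then s.2.2 + 1 else s.2.2))) s
    = (l.foldl (fun a p => if ([1, 2, 3, 4, 5] : List Int)[p.2 % 5]! = p.1 then a + 1 else a) s.1,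
       l.foldl (fun a p => if ([2, 1, 2, 3, 2, 4, 2, 5] : List Int)[p.2 % 8]! = p.1 then a + 1 else a) s.2.1,
       l.foldl (fun a p => if ([3, 3, 1, 1, 2, 2, 4, 4, 5, 5] : List Int)[p.2 % 10]! = p.1 then a + 1 else a) s.2.2) := by
  induction l generalizing s with
  | nil => rfl
  | cons p l ih => simp only [List.foldl_cons, ih]

-- B's cycling-cursor pass equals A's modular-index fold (cursor invariant: the
-- normalized cursor is pat.drop (n % pat.length))
lemma go_spec (pat : List Int) (hpat : pat ≠ []) :
    ∀ (answers : List Int) (n : Nat) (cur : List Int) (s : Int),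
      (if cur = [] then pat else cur) = pat.drop (n % pat.length) →
      scoreGo pat answers cur s =
        (answers.zipIdx n).foldl (fun a p => if pat[p.2 % pat.length]! = p.1 then a + 1 else a) s := by
  intro answers
  induction answers with
  | nil => intro n cur s _; rfl
  | cons a as ih =>
    intro n cur s h
    have hL : 0 < pat.length := List.length_pos_of_ne_nil hpat
    have hk : n % pat.length < pat.length := Nat.mod_lt _ hL
    have hc : (if cur = [] then pat else cur) = pat.drop (n % pat.length) := h
    have hhead : (pat.drop (n % pat.length)).head? = some pat[n % pat.length] := by
      rw [List.head?_drop]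
      exact List.getElem?_eq_getElem hk
    have htail : (pat.drop (n % pat.length)).tail = pat.drop (n % pat.length + 1) := by
      rw [List.tail_drop]
    have hbang : pat[n % pat.length]! = pat[n % pat.length] := getElem!_pos pat _ hk
    have hnext : (if (pat.drop (n % pat.length)).tail = [] then pat else (pat.drop (n % pat.length)).tail)
        = pat.drop ((n + 1) % pat.length) := by
      rw [htail]
      have h2 : (n + 1) % pat.length = (n % pat.length + 1) % pat.length := by
        simp [Nat.add_mod]
      by_cases he : n % pat.length + 1 = pat.length
      · have h0 : (n + 1) % pat.length = 0 := by
          rw [h2, he, Nat.mod_self]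
        simp [he, List.drop_length, h0]
      · have hlt : n % pat.length + 1 < pat.length := by omega
        have hne : pat.drop (n % pat.length + 1) ≠ [] := by
          simp [List.drop_eq_nil_iff]
          omega
        have h1 : (n + 1) % pat.length = n % pat.length + 1 := by
          rw [h2, Nat.mod_eq_of_lt hlt]
        simp [hne, h1]
    rw [scoreGo]
    simp only [hc, hhead, List.zipIdx_cons, List.foldl_cons, hbang]
    rw [ih (n + 1) (pat.drop (n % pat.length)).tail _ hnext]
    congr 1
    simp only [Option.some.injEq]

lemma go1 (answers : List Int) :
    scoreGo [1, 2, 3, 4, 5] answers [] 0 =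
      answers.zipIdx.foldl (fun a p => if ([1, 2, 3, 4, 5] : List Int)[p.2 % 5]! = p.1 then a + 1 else a) 0 := by
  have := go_spec [1, 2, 3, 4, 5] (by simp) answers 0 [] 0 (by simp)
  simpa using this

lemma go2 (answers : List Int) :
    scoreGo [2, 1, 2, 3, 2, 4, 2, 5] answers [] 0 =
      answers.zipIdx.foldl (fun a p => if ([2, 1, 2, 3, 2, 4, 2, 5] : List Int)[p.2 % 8]! = p.1 then a + 1 else a) 0 := by
  have := go_spec [2, 1, 2, 3, 2, 4, 2, 5] (by simp) answers 0 [] 0 (by simp)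
  simpa using this

lemma go3 (answers : List Int) :
    scoreGo [3, 3, 1, 1, 2, 2, 4, 4, 5, 5] answers [] 0 =
      answers.zipIdx.foldl (fun a p => if ([3, 3, 1, 1, 2, 2, 4, 4, 5, 5] : List Int)[p.2 % 10]! = p.1 then a + 1 else a) 0 := by
  have := go_spec [3, 3, 1, 1, 2, 2, 4, 4, 5, 5] (by simp) answers 0 [] 0 (by simp)
  simpa using this

-- ===== VERDICT =====
theorem solution_spec : Claim_equal_solution := by
  intro answers _
  unfold Spec_solution
  simp only [solution, solution_alt]
  rw [fold_split, go1, go2, go3]
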